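-- pv_equiv track=rewrite | github.com/Ballistyxx/CLARA | metrics/lightweight_metrics.py | _count_spacing_violations
-- ===== SOURCE A (Python) =====
-- from typing import Dict, List, Tuple, Optional, Any, Set
--
-- def _count_spacing_violations(positions: Dict) -> int:
--     """Count spacing violations between components."""
--     violations = 0
--     components = list(positions.items())
--
--     for i in range(len(components)):
--         for j in range(i + 1, len(components)):
--             comp1_id, (x1, y1, o1) = components[i]
--             comp2_id, (x2, y2, o2) = components[j]
--
--             # Simple spacing check (assume components are 1x1)
--             dx = abs(x1 - x2)
--             dy = abs(y1 - y2)
--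
--             # Violation if components are too close (adjacent is okay)
--             if dx == 0 and dy == 0:  # Overlapping
--                 violations += 2
--             elif dx <= 1 and dy <= 1 and (dx + dy) < 2:  # Too close
--                 violations += 1
--
--     return violations
-- ===== SOURCE B (Python) =====
-- def _count_spacing_violations(positions):
--     """Count spacing violations in one pass with a hash of already-seen cells."""
--     violations = 0
--     seen = {}
--     for (x, y, o) in positions.values():
--         violations += 2 * seen.get((x, y), 0)
--         violations += seen.get((x + 1, y), 0) + seen.get((x - 1, y), 0)
--         violations += seen.get((x, y + 1), 0) + seen.get((x, y - 1), 0)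
--         seen[(x, y)] = seen.get((x, y), 0) + 1
--     return violations
-- ===== Notes on version B (the rewrite author's own statement) =====
-- stated objective: faster
-- what changed: Replaced the O(n^2) all-pairs double loop with a single pass that keeps a hash map of already-seen cell counts and adds 2*count(same cell) plus the counts of the four orthogonal neighbour cells for each component.
import Mathlib
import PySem

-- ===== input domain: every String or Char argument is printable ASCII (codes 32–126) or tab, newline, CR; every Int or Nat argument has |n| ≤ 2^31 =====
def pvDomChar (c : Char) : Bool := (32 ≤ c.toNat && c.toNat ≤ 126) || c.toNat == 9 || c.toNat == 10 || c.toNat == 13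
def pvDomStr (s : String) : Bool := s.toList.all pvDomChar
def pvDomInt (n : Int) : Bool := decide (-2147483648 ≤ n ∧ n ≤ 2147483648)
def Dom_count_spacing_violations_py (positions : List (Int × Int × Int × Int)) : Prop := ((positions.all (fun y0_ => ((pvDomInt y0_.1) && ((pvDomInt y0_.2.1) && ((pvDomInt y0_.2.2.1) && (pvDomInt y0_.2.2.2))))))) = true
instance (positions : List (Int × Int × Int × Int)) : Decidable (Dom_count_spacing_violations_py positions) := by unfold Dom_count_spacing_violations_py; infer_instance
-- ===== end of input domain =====

-- B replaces A's O(n^2) all-pairs double loop with one pass over the components that keeps a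
-- hash map of already-seen cell counts (objective: faster, asymptotic).

-- ===== PORT A =====
-- the dict argument arrives as an association list; both Pythons receive it as a dict, so both
-- ports first build the Python dict (a later duplicate key overwrites in place)
def pvDictOf (positions : List (Int × Int × Int × Int)) : PySem.Dict Int (Int × Int × Int) :=
  positions.foldl (fun d q => d.insert q.1 q.2) PySem.Dict.empty

def count_spacing_violations_py (positions : List (Int × Int × Int × Int)) : Int :=
  let components := (pvDictOf positions).items
  (PySem.List.pyRange 0 (components.length : Int) 1).foldl (fun violations i =>
    (PySem.List.pyRange (i + 1) (components.length : Int) 1).foldl (fun violations j =>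
      match PySem.List.pyGet? components i with
      | none => violations
      | some (_, x1, y1, _) =>
        match PySem.List.pyGet? components j with
        | none => violations
        | some (_, x2, y2, _) =>
          let dx := |x1 - x2|
          let dy := |y1 - y2|
          if dx = 0 ∧ dy = 0 then violations + 2
          else if dx ≤ 1 ∧ dy ≤ 1 ∧ dx + dy < 2 then violations + 1
          else violations) violations) 0

-- ===== PORT B =====
def count_spacing_violations_py_alt (positions : List (Int × Int × Int × Int)) : Int :=
  ((pvDictOf positions).values.foldl
    (fun (acc : Int × PySem.Dict (Int × Int) Int) v =>
      match v with
      | (x, y, _) =>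
        (acc.1 + 2 * acc.2.getD (x, y) 0
               + (acc.2.getD (x + 1, y) 0 + acc.2.getD (x - 1, y) 0)
               + (acc.2.getD (x, y + 1) 0 + acc.2.getD (x, y - 1) 0),
         acc.2.insert (x, y) (acc.2.getD (x, y) 0 + 1)))
    (0, PySem.Dict.empty)).1

-- ===== PRECONDITION & SPEC =====
def Spec_count_spacing_violations_py (positions : List (Int × Int × Int × Int)) (out : Int) : Prop := out = count_spacing_violations_py_alt positions
instance (positions : List (Int × Int × Int × Int)) (out : Int) : Decidable (Spec_count_spacing_violations_py positions out) := by unfold Spec_count_spacing_violations_py; infer_instance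

-- ===== CLAIM (what is proved, stated in full; the proofs are below) =====
def Claim_equal_count_spacing_violations_py : Prop := ∀ (positions : List (Int × Int × Int × Int)), Dom_count_spacing_violations_py positions → Spec_count_spacing_violations_py positions (count_spacing_violations_py positions)

-- ===== LEMMAS AND PROOFS =====

-- the projection of a dict item to its cell
def pvProj (e : Int × (Int × Int × Int)) : Int × Int := (e.2.1, e.2.2.1)

-- the weight A adds for an (unordered) pair of cells
def pvW (p q : Int × Int) : Int :=
  let dx := |p.1 - q.1|
  let dy := |p.2 - q.2|
  if dx = 0 ∧ dy = 0 then 2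
  else if dx ≤ 1 ∧ dy ≤ 1 ∧ dx + dy < 2 then 1
  else 0

def pvSumW (p : Int × Int) (l : List (Int × Int)) : Int := (l.map (pvW p)).sum

def pvPairSum : List (Int × Int) → Int
  | [] => 0
  | p :: l => pvSumW p l + pvPairSum l

lemma pvW_symm (p q : Int × Int) : pvW p q = pvW q p := by
  simp only [pvW]
  rw [abs_sub_comm p.1 q.1, abs_sub_comm p.2 q.2]

lemma pvW_split (p q : Int × Int) :
    pvW p q = (if q = p then 2 else 0)
      + ((if q = (p.1 + 1, p.2) then 1 else 0) + (if q = (p.1 - 1, p.2) then 1 else 0))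
      + ((if q = (p.1, p.2 + 1) then 1 else 0) + (if q = (p.1, p.2 - 1) then 1 else 0)) := by
  rcases p with ⟨a, b⟩
  rcases q with ⟨c, d⟩
  simp only [pvW, Prod.mk.injEq, Int.abs_eq_natAbs]
  split_ifs <;> omega

lemma pvSumW_cons (p q : Int × Int) (l : List (Int × Int)) :
    pvSumW p (q :: l) = pvW p q + pvSumW p l := by
  simp [pvSumW]

-- Σ_{q ∈ l} pvW p q computed from counts of the five relevant cells
lemma pvSumW_eq_counts (p : Int × Int) (l : List (Int × Int)) :
    pvSumW p l = 2 * (l.count p : Int)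
      + ((l.count (p.1 + 1, p.2) : Int) + (l.count (p.1 - 1, p.2) : Int))
      + ((l.count (p.1, p.2 + 1) : Int) + (l.count (p.1, p.2 - 1) : Int)) := by
  rcases p with ⟨a, b⟩
  induction l with
  | nil => simp [pvSumW]
  | cons q l ih =>
    rcases q with ⟨c, d⟩
    rw [pvSumW_cons, ih, pvW_split]
    simp only [List.count_cons, Prod.mk.injEq, beq_iff_eq]
    push_cast
    split_ifs <;> omega

-- ---------- A's nested loops compute pvPairSum ----------

lemma pvRange_nil (a b : Int) (h : b ≤ a) : PySem.List.pyRange a b 1 = [] := by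
  simp [PySem.List.pyRange]
  omega

lemma pvInner (cs : List (Int × (Int × Int × Int))) (i : Int) (k x1 y1 o1 : Int)
    (h1 : PySem.List.pyGet? cs i = some (k, x1, y1, o1)) :
    ∀ (fuel m : Nat), cs.length ≤ m + fuel → ∀ acc : Int,
    (PySem.List.pyRange (m : Int) (cs.length : Int) 1).foldl (fun violations j =>
      match PySem.List.pyGet? cs i with
      | none => violations
      | some (_, x1, y1, _) =>
        match PySem.List.pyGet? cs j with
        | none => violations
        | some (_, x2, y2, _) =>
          let dx := |x1 - x2|
          let dy := |y1 - y2|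
          if dx = 0 ∧ dy = 0 then violations + 2
          else if dx ≤ 1 ∧ dy ≤ 1 ∧ dx + dy < 2 then violations + 1
          else violations) acc
    = acc + pvSumW (x1, y1) ((cs.drop m).map pvProj) := by
  intro fuel
  induction fuel with
  | zero =>
    intro m hm acc
    rw [pvRange_nil _ _ (by exact_mod_cast hm), List.drop_eq_nil_of_le (by omega)]
    simp [pvSumW]
  | succ fuel ih =>
    intro m hm acc
    by_cases hlt : m < cs.length
    · rw [PySem.List.pyRange_one_cons (by exact_mod_cast hlt)]
      rw [List.foldl_cons]
      have hg : PySem.List.pyGet? cs (m : Int) = some cs[m] := by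
        rw [PySem.List.pyGet?_natCast]
        exact List.getElem?_eq_getElem hlt
      have hdrop : cs.drop m = cs[m] :: cs.drop (m + 1) := List.drop_eq_getElem_cons hlt
      have hcast : (m : Int) + 1 = ((m + 1 : Nat) : Int) := by push_cast; ring
      rw [hcast]
      rcases he : cs[m] with ⟨k2, x2, y2, o2⟩
      have hg' : PySem.List.pyGet? cs (m : Int) = some (k2, x2, y2, o2) := by rw [hg, he]
      rw [ih (m + 1) (by omega)]
      rw [hdrop, he]
      simp only [h1, hg', List.map_cons, pvSumW_cons]
      simp only [pvProj, pvW]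
      split_ifs <;> ring
    · rw [pvRange_nil _ _ (by exact_mod_cast (by omega : cs.length ≤ m)),
        List.drop_eq_nil_of_le (by omega)]
      simp [pvSumW]

lemma pvOuter (cs : List (Int × (Int × Int × Int))) :
    ∀ (fuel m : Nat), cs.length ≤ m + fuel → ∀ acc : Int,
    (PySem.List.pyRange (m : Int) (cs.length : Int) 1).foldl (fun violations i =>
      (PySem.List.pyRange (i + 1) (cs.length : Int) 1).foldl (fun violations j =>
        match PySem.List.pyGet? cs i with
        | none => violations
        | some (_, x1, y1, _) =>
          match PySem.List.pyGet? cs j with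
          | none => violations
          | some (_, x2, y2, _) =>
            let dx := |x1 - x2|
            let dy := |y1 - y2|
            if dx = 0 ∧ dy = 0 then violations + 2
            else if dx ≤ 1 ∧ dy ≤ 1 ∧ dx + dy < 2 then violations + 1
            else violations) violations) acc
    = acc + pvPairSum ((cs.drop m).map pvProj) := by
  intro fuel
  induction fuel with
  | zero =>
    intro m hm acc
    rw [pvRange_nil _ _ (by exact_mod_cast hm), List.drop_eq_nil_of_le (by omega)]
    simp [pvPairSum]
  | succ fuel ih =>
    intro m hm acc
    by_cases hlt : m < cs.length
    · rw [PySem.List.pyRange_one_cons (by exact_mod_cast hlt)]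
      rw [List.foldl_cons]
      have hg : PySem.List.pyGet? cs (m : Int) = some cs[m] := by
        rw [PySem.List.pyGet?_natCast]
        exact List.getElem?_eq_getElem hlt
      have hdrop : cs.drop m = cs[m] :: cs.drop (m + 1) := List.drop_eq_getElem_cons hlt
      rcases he : cs[m] with ⟨k1, x1, y1, o1⟩
      have hg' : PySem.List.pyGet? cs (m : Int) = some (k1, x1, y1, o1) := by rw [hg, he]
      have hcast : (m : Int) + 1 = ((m + 1 : Nat) : Int) := by push_cast; ring
      rw [hcast, pvInner cs (m : Int) k1 x1 y1 o1 hg' fuel (m + 1) (by omega) acc,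
        ih (m + 1) (by omega)]
      rw [hdrop, he]
      simp only [List.map_cons, pvPairSum, pvProj]
      ring
    · rw [pvRange_nil _ _ (by exact_mod_cast (by omega : cs.length ≤ m)),
        List.drop_eq_nil_of_le (by omega)]
      simp [pvPairSum]

lemma pvA_eq (positions : List (Int × Int × Int × Int)) :
    count_spacing_violations_py positions
      = pvPairSum (((pvDictOf positions).items).map pvProj) := by
  unfold count_spacing_violations_py
  have h := pvOuter ((pvDictOf positions).items) ((pvDictOf positions).items.length) 0
    (by omega) 0
  simpa using h

-- ---------- B's single pass computes pvPairSum ----------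

def pvInc (prev : List (Int × Int)) (p : Int × Int) : Int :=
  2 * (prev.count p : Int)
    + ((prev.count (p.1 + 1, p.2) : Int) + (prev.count (p.1 - 1, p.2) : Int))
    + ((prev.count (p.1, p.2 + 1) : Int) + (prev.count (p.1, p.2 - 1) : Int))

def pvC (prev l : List (Int × Int)) : Int :=
  match l with
  | [] => 0
  | p :: l => pvInc prev p + pvC (prev ++ [p]) l

lemma pvBLoop (l : List (Int × Int × Int)) :
    ∀ (prev : List (Int × Int)) (viol : Int) (seen : PySem.Dict (Int × Int) Int),
    (∀ c, seen.getD c 0 = (prev.count c : Int)) →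
    (l.foldl
      (fun (acc : Int × PySem.Dict (Int × Int) Int) v =>
        match v with
        | (x, y, _) =>
          (acc.1 + 2 * acc.2.getD (x, y) 0
                 + (acc.2.getD (x + 1, y) 0 + acc.2.getD (x - 1, y) 0)
                 + (acc.2.getD (x, y + 1) 0 + acc.2.getD (x, y - 1) 0),
           acc.2.insert (x, y) (acc.2.getD (x, y) 0 + 1)))
      (viol, seen)).1
    = viol + pvC prev (l.map (fun v => (v.1, v.2.1))) := by
  induction l with
  | nil => intro prev viol seen _; simp [pvC]
  | cons v l ih =>
    intro prev viol seen hseen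
    rcases v with ⟨x, y, o⟩
    rw [List.foldl_cons]
    have hnext : ∀ c, (seen.insert (x, y) (seen.getD (x, y) 0 + 1)).getD c 0
        = ((prev ++ [(x, y)]).count c : Int) := by
      intro c
      rw [PySem.Dict.getD_insert]
      by_cases hc : c = (x, y)
      · simp [hc, hseen, List.count_append]
      · have hcs : ¬ (x, y) = c := fun h => hc h.symm
        simp [hc, hseen, List.count_append, hcs]
    rw [ih (prev ++ [(x, y)]) _ _ hnext]
    simp only [List.map_cons, pvC, pvInc, hseen]
    ring

def pvCross (prev l : List (Int × Int)) : Int := (l.map (fun q => pvSumW q prev)).sum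

lemma pvCross_append (prev : List (Int × Int)) (l : List (Int × Int)) (p : Int × Int) :
    pvCross (prev ++ [p]) l = pvCross prev l + pvSumW p l := by
  induction l with
  | nil => simp [pvCross, pvSumW]
  | cons q l ih =>
    simp only [pvCross, List.map_cons, List.sum_cons] at *
    rw [pvSumW_cons]
    have hq : pvSumW q (prev ++ [p]) = pvSumW q prev + pvW q p := by
      simp [pvSumW]
    rw [hq, ih, pvW_symm q p]
    ring

lemma pvC_eq (l : List (Int × Int)) :
    ∀ prev, pvC prev l = pvCross prev l + pvPairSum l := by
  induction l with
  | nil => intro prev; simp [pvC, pvCross, pvPairSum]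
  | cons p l ih =>
    intro prev
    have hinc : pvInc prev p = pvSumW p prev := by
      rw [pvSumW_eq_counts]; rfl
    simp only [pvC, pvPairSum]
    rw [ih (prev ++ [p]), pvCross_append, hinc]
    simp only [pvCross, List.map_cons, List.sum_cons]
    ring

lemma pvB_eq (positions : List (Int × Int × Int × Int)) :
    count_spacing_violations_py_alt positions
      = pvPairSum (((pvDictOf positions).items).map pvProj) := by
  unfold count_spacing_violations_py_alt
  rw [pvBLoop _ [] 0 PySem.Dict.empty (by intro c; simp [PySem.Dict.getD_empty])]
  rw [pvC_eq]
  have hv : (pvDictOf positions).values = ((pvDictOf positions).items).map Prod.snd := rfl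
  have hcross : ∀ l, pvCross [] l = 0 := by
    intro l
    simp [pvCross, pvSumW]
  rw [hcross, hv, List.map_map]
  simp only [zero_add]
  rfl

-- ===== VERDICT (by name: the statement is the Claim_ definition above) =====
theorem count_spacing_violations_py_spec : Claim_equal_count_spacing_violations_py := by
  intro positions _
  unfold Spec_count_spacing_violations_py
  rw [pvA_eq, pvB_eq]
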